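-- pv_equiv track=rewrite | github.com/I0Y0I/CS61A | Homework/hog/hog.py | sus_points
-- ===== SOURCE A (Python) =====
-- def is_prime(n):
--     """Return whether N is prime."""
--     if n == 1:
--         return False
--     k = 2
--     while k < n:
--         if n % k == 0:
--             return False
--         k += 1
--     return True
--
-- def num_factors(n):
--     """Return the number of factors of N, including 1 and N itself."""
--     # BEGIN PROBLEM 4
--     "*** YOUR CODE HERE ***"
--     o = 0
--     for i in range(n):
--         if n % (i + 1) == 0:
--             o += 1
--     return o
--
-- def sus_points(score):
--     """Return the new score of a player taking into account the Sus Fuss rule."""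
--     # BEGIN PROBLEM 4
--     "*** YOUR CODE HERE ***"
--     n = num_factors(score)
--     if n == 3 or n == 4:
--         score += 1
--         while not is_prime(score):
--             score += 1
--     return score
-- ===== SOURCE B (Python) =====
-- def sus_points(score):
--     """Return the new score of a player taking into account the Sus Fuss rule."""
--     if _divisor_count(score) in (3, 4):
--         score += 1
--         while not _is_prime(score):
--             score += 1
--     return score
--
-- def _is_prime(n):
--     """Primality by trial division up to sqrt(n)."""
--     if n < 2:
--         return False
--     d = 2
--     while d * d <= n:
--         if n % d == 0:
--             return False
--         d += 1
--     return True
--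
-- def _divisor_count(n):
--     """Number of positive divisors of n, counting divisor pairs up to sqrt(n)."""
--     c = 0
--     d = 1
--     while d * d <= n:
--         if n % d == 0:
--             c += 1 if d * d == n else 2
--         d += 1
--     return c
-- ===== Notes on version B (the rewrite author's own statement) =====
-- stated objective: faster
-- what changed: Factor counting and primality testing are done by trial division up to sqrt(n) (counting divisor pairs) instead of scanning every integer below n.
import Mathlib
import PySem

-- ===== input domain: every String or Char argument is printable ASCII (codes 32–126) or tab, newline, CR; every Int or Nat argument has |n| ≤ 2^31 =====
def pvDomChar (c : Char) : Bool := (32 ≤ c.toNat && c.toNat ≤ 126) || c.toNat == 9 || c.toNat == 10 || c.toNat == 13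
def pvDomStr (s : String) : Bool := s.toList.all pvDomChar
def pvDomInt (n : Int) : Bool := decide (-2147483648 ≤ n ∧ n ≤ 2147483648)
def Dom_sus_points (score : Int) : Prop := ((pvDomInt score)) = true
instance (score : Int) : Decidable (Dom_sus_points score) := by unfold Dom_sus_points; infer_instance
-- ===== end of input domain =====

-- B replaces A's linear scans (factor counting over all of [1,n], primality over all of [2,n))
-- by trial division up to sqrt(n), counting divisor pairs.

-- ===== PORT A =====
-- is_prime's while loop: k walks from 2 towards n
def isPrimeALoop (n k : Int) : Bool :=
  if k < n then
    if PySem.Int.mod n k == 0 then false else isPrimeALoop n (k + 1)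
  else true
termination_by (n - k).toNat
decreasing_by omega

def is_primeA (n : Int) : Bool :=
  if n == 1 then false else isPrimeALoop n 2

-- num_factors: for i in range(n): if n % (i+1) == 0: o += 1
def num_factorsA (n : Int) : Int :=
  (PySem.List.pyRange 0 n 1).foldl
    (fun o i => if PySem.Int.mod n (i + 1) == 0 then o + 1 else o) 0

-- `while not is_prime(score): score += 1`, with a fuel guard for totality only
-- (the loop reaches a prime long before the fuel runs out)
def susLoopA (fuel : Nat) (s : Int) : Int :=
  match fuel with
  | 0 => s
  | f + 1 => if !(is_primeA s) then susLoopA f (s + 1) else s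

def sus_points (score : Int) : Int :=
  let n := num_factorsA score
  if n == 3 || n == 4 then susLoopA 18446744073709551616 (score + 1) else score

-- ===== PORT B =====
-- _is_prime's while loop: d walks from 2 while d*d <= n
def isPrimeBLoop (n d : Int) : Bool :=
  if d * d ≤ n then
    if PySem.Int.mod n d == 0 then false else isPrimeBLoop n (d + 1)
  else true
termination_by (n + 1 - d).toNat
decreasing_by
  have h1 : (0:Int) ≤ d * d := mul_self_nonneg d
  have h2 : 2 * d - 1 ≤ d * d := by nlinarith
  omega

def is_primeB (n : Int) : Bool :=
  if n < 2 then false else isPrimeBLoop n 2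

-- _divisor_count's while loop: d walks from 1 while d*d <= n, accumulating c
def divCountLoop (n d c : Int) : Int :=
  if d * d ≤ n then
    divCountLoop n (d + 1)
      (if PySem.Int.mod n d == 0 then (if d * d == n then c + 1 else c + 2) else c)
  else c
termination_by (n + 1 - d).toNat
decreasing_by
  have h1 : (0:Int) ≤ d * d := mul_self_nonneg d
  have h2 : 2 * d - 1 ≤ d * d := by nlinarith
  omega

def num_factorsB (n : Int) : Int := divCountLoop n 1 0

-- `while not _is_prime(score)`, same fuel guard for totality
def susLoopB (fuel : Nat) (s : Int) : Int :=
  match fuel with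
  | 0 => s
  | f + 1 => if !(is_primeB s) then susLoopB f (s + 1) else s

def sus_points_alt (score : Int) : Int :=
  let c := num_factorsB score
  if c == 3 || c == 4 then susLoopB 18446744073709551616 (score + 1) else score

-- ===== PRECONDITION & SPEC =====
def Spec_sus_points (score : Int) (out : Int) : Prop := out = sus_points_alt score
instance (score : Int) (out : Int) : Decidable (Spec_sus_points score out) := by unfold Spec_sus_points; infer_instance

-- ===== CLAIM (what is proved, stated in full; the proofs are below) =====
def Claim_equal_sus_points : Prop := ∀ (score : Int), Dom_sus_points score → Spec_sus_points score (sus_points score)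

-- ===== LEMMAS AND PROOFS =====

theorem isPrimeALoop_iff (n k : Int) :
    isPrimeALoop n k = true ↔ ∀ j : Int, k ≤ j → j < n → ¬ j ∣ n := by
  induction k using isPrimeALoop.induct (n := n) with
  | case1 k hlt hmod =>
    rw [isPrimeALoop]
    simp only [if_pos hlt, hmod, if_true]
    constructor
    · intro h; exact absurd h (by simp)
    · intro h; exact absurd ((PySem.Int.mod_eq_zero_iff_dvd n k).mp (by simpa using hmod))
        (h k le_rfl hlt)
  | case2 k hlt hmod ih =>
    rw [isPrimeALoop]
    simp only [if_pos hlt, hmod, Bool.false_eq_true, if_false]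
    rw [ih]
    constructor
    · intro h j hj1 hj2
      rcases eq_or_lt_of_le hj1 with rfl | hj1'
      · intro hd; exact hmod (by simp [(PySem.Int.mod_eq_zero_iff_dvd n k).mpr hd])
      · exact h j (by omega) hj2
    · intro h j hj1 hj2; exact h j (by omega) hj2
  | case3 k hlt =>
    rw [isPrimeALoop]
    simp only [if_neg hlt]
    constructor
    · intro _ j hj1 hj2; omega
    · intro _; trivial

theorem isPrimeBLoop_iff (n d : Int) (hd0 : 0 ≤ d) :
    isPrimeBLoop n d = true ↔ ∀ j : Int, d ≤ j → j * j ≤ n → ¬ j ∣ n := by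
  induction d using isPrimeBLoop.induct (n := n) with
  | case1 d hle hmod =>
    rw [isPrimeBLoop]
    simp only [if_pos hle, hmod, if_true]
    constructor
    · intro h; exact absurd h (by simp)
    · intro h; exact absurd ((PySem.Int.mod_eq_zero_iff_dvd n d).mp (by simpa using hmod))
        (h d le_rfl hle)
  | case2 d hle hmod ih =>
    rw [isPrimeBLoop]
    simp only [if_pos hle, hmod, Bool.false_eq_true, if_false]
    rw [ih (by omega)]
    constructor
    · intro h j hj1 hj2
      rcases eq_or_lt_of_le hj1 with rfl | hj1'
      · intro hd; exact hmod (by simp [(PySem.Int.mod_eq_zero_iff_dvd n d).mpr hd])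
      · exact h j (by omega) hj2
    · intro h j hj1 hj2; exact h j (by omega) hj2
  | case3 d hle =>
    rw [isPrimeBLoop]
    simp only [if_neg hle]
    constructor
    · intro _ j hj1 hj2 _
      nlinarith
    · intro _; trivial

-- the two trial-division bounds test the same divisors up to pairing
theorem trial_div_iff (n : Int) (hn : 2 ≤ n) :
    (∀ j : Int, 2 ≤ j → j < n → ¬ j ∣ n) ↔ (∀ j : Int, 2 ≤ j → j * j ≤ n → ¬ j ∣ n) := by
  constructor
  · intro h j hj1 hj2
    exact h j hj1 (by nlinarith)
  · intro h j hj1 hj2 hd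
    obtain ⟨e, he⟩ := hd
    have hj0 : 0 < j := by omega
    have he2 : 2 ≤ e := by nlinarith
    by_cases hc : j * j ≤ n
    · exact h j hj1 hc ⟨e, he⟩
    · have hej : e < j := by nlinarith
      exact h e he2 (by nlinarith) ⟨j, by rw [he]; ring⟩

theorem isPrime_eq (n : Int) (hn : 2 ≤ n) : is_primeA n = is_primeB n := by
  rw [is_primeA, is_primeB, if_neg (by simp; omega), if_neg (by omega)]
  rw [Bool.eq_iff_iff, isPrimeALoop_iff, isPrimeBLoop_iff n 2 (by omega)]
  exact trial_div_iff n hn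

theorem susLoop_eq (fuel : Nat) (s : Int) : 2 ≤ s → susLoopA fuel s = susLoopB fuel s := by
  induction fuel generalizing s with
  | zero => intro _; rfl
  | succ f ih =>
    intro hs
    rw [susLoopA, susLoopB, ← isPrime_eq s hs]
    by_cases h : is_primeA s
    · simp [h]
    · simp only [Bool.not_eq_true] at h
      simp [h]
      exact ih (s + 1) (by omega)

theorem num_factorsA_nonpos (n : Int) (hn : n ≤ 0) : num_factorsA n = 0 := by
  have h : PySem.List.pyRange 0 n 1 = [] := by
    unfold PySem.List.pyRange; simp; omega
  rw [num_factorsA, h]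
  rfl

-- counting over List.range as a Finset-filter cardinality
theorem card_filter_range (m : Nat) (p : Nat → Prop) [DecidablePred p] :
    ((Finset.range m).filter p).card = (List.range m).countP (fun i => decide (p i)) := by
  induction m with
  | zero => simp
  | succ k ih => rw [Finset.range_add_one, List.range_succ, Finset.filter_insert, List.countP_append]
                 by_cases h : p k <;> simp [h, ih, Finset.card_insert_of_notMem]

-- A's fold counts the i < n with (i+1) | n
theorem numA_eq_card (m : Nat) :
    num_factorsA (m : Int) = (((Finset.range m).filter (fun i => (i+1) ∣ m)).card : Int) := by
  rw [num_factorsA, PySem.List.pyRange_zero_natCast, List.foldl_map]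
  rw [show (fun (o : Int) (k : Nat) => if PySem.Int.mod (m:Int) ((k:Int) + 1) == 0 then o + 1 else o)
      = (fun o k => if (decide ((k+1) ∣ m)) = true then o + 1 else o) from ?_]
  · rw [PySem.List.foldl_count_if, card_filter_range]
    simp
  · funext o k
    congr 1
    rw [Bool.eq_iff_iff]
    simp
    exact_mod_cast Iff.rfl

-- shift i ↦ i+1 : divisor-candidates in range n vs in Icc 1 n
theorem card_reindex (m : Nat) :
    ((Finset.range m).filter (fun i => (i+1) ∣ m)).card
      = ((Finset.Icc 1 m).filter (fun d => d ∣ m)).card := by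
  apply Finset.card_bij' (i := fun a _ => a + 1) (j := fun d _ => d - 1)
  case hi =>
    intro a ha
    simp only [Finset.mem_filter, Finset.mem_range] at ha
    simp only [Finset.mem_filter, Finset.mem_Icc]
    exact ⟨⟨by omega, by omega⟩, ha.2⟩
  case hj =>
    intro d hd
    simp only [Finset.mem_filter, Finset.mem_Icc] at hd
    simp only [Finset.mem_filter, Finset.mem_range]
    constructor
    · omega
    · have h : d - 1 + 1 = d := by omega
      rw [h]; exact hd.2
  case left_inv => intro a _; omega
  case right_inv =>
    intro d hd
    simp only [Finset.mem_filter, Finset.mem_Icc] at hd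
    omega

-- what B's loop adds for the candidate e
def gN (m e : Nat) : Nat := if e ∣ m then (if e * e = m then 1 else 2) else 0

theorem divCountLoop_inv (m : Nat) (d c : Int) :
    1 ≤ d → divCountLoop (m : Int) d c
      = c + ((∑ e ∈ Finset.Ico d.toNat (Nat.sqrt m + 1), gN m e : Nat) : Int) := by
  induction d, c using divCountLoop.induct (n := (m : Int)) with
  | case1 d c hle ih =>
    intro hd
    rw [divCountLoop, if_pos hle]
    simp only [dite_eq_ite] at ih
    rw [ih (by omega)]
    have hdI : ((d.toNat : Int)) = d := Int.toNat_of_nonneg (by omega)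
    have hsq : d.toNat ≤ Nat.sqrt m := by
      rw [Nat.le_sqrt]
      have : ((d.toNat : Int)) * ((d.toNat : Int)) ≤ (m : Int) := by rw [hdI]; exact hle
      exact_mod_cast this
    have hsplit := Finset.sum_eq_sum_Ico_succ_bot (a := d.toNat) (b := Nat.sqrt m + 1)
      (by omega) (gN m)
    have htn : (d + 1).toNat = d.toNat + 1 := by omega
    rw [htn, hsplit]
    have hdvd : (PySem.Int.mod (m : Int) d == 0) = decide (d.toNat ∣ m) := by
      rw [Bool.eq_iff_iff]
      simp only [beq_iff_eq, decide_eq_true_eq, PySem.Int.mod_eq_zero_iff_dvd]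
      rw [← hdI]
      exact Int.natCast_dvd_natCast
    have hsqeq : (d * d == (m : Int)) = decide (d.toNat * d.toNat = m) := by
      rw [Bool.eq_iff_iff]
      simp only [beq_iff_eq, decide_eq_true_eq]
      rw [← hdI]
      exact_mod_cast Iff.rfl
    rw [hdvd, hsqeq]
    by_cases h1 : d.toNat ∣ m <;> by_cases h2 : d.toNat * d.toNat = m
    · simp [h1, h2, gN]; ring
    · simp [h1, h2, gN]; ring
    · simp [h1, gN]
    · simp [h1, gN]
  | case2 d c hle =>
    intro hd
    rw [divCountLoop, if_neg hle]
    have hdI : ((d.toNat : Int)) = d := Int.toNat_of_nonneg (by omega)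
    have hgt : Nat.sqrt m < d.toNat := by
      rw [Nat.sqrt_lt]
      have : (m : Int) < ((d.toNat : Int)) * ((d.toNat : Int)) := by rw [hdI]; omega
      exact_mod_cast this
    rw [Finset.Ico_eq_empty (by omega)]
    simp

-- the divisor-pairing d ↦ m/d : full divisor count = B's paired count up to sqrt m
theorem pairing (m : Nat) (hm : 1 ≤ m) :
    ((Finset.Icc 1 m).filter (fun d => d ∣ m)).card
      = ∑ e ∈ Finset.Icc 1 (Nat.sqrt m), gN m e := by
  set T : Finset Nat := (Finset.Icc 1 (Nat.sqrt m)).filter (fun e => e ∣ m) with hT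
  set S : Finset Nat := (Finset.Icc 1 m).filter (fun d => d ∣ m) with hS
  have hRHS : ∑ e ∈ Finset.Icc 1 (Nat.sqrt m), gN m e
      = T.card + (T.filter (fun e => e * e < m)).card := by
    rw [show (∑ e ∈ Finset.Icc 1 (Nat.sqrt m), gN m e)
        = ∑ e ∈ T, (if e * e = m then 1 else 2) from ?_]
    · rw [show (∑ e ∈ T, (if e * e = m then 1 else 2))
          = ∑ e ∈ T, ((if e * e < m then 1 else 0) + 1) from ?_]
      · rw [Finset.sum_add_distrib, Finset.sum_const, smul_eq_mul, mul_one,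
            ← Finset.card_filter]
        omega
      · apply Finset.sum_congr rfl
        intro e he
        rw [hT] at he
        simp only [Finset.mem_filter, Finset.mem_Icc] at he
        have : e * e ≤ m := Nat.le_sqrt.mp he.1.2
        by_cases h : e * e = m <;> (simp [h]; try omega)
    · rw [Finset.sum_filter]
      apply Finset.sum_congr rfl
      intro e _
      by_cases h : e ∣ m <;> simp [gN, h]
  have hLHS : S.card = (S.filter (fun d => d ≤ Nat.sqrt m)).card
      + (S.filter (fun d => ¬ d ≤ Nat.sqrt m)).card :=
    (Finset.card_filter_add_card_filter_not (s := S) (fun d => d ≤ Nat.sqrt m)).symm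
  have hsmall : S.filter (fun d => d ≤ Nat.sqrt m) = T := by
    ext d
    simp only [hS, hT, Finset.mem_filter, Finset.mem_Icc]
    constructor
    · rintro ⟨⟨⟨h1, _⟩, h3⟩, h4⟩; exact ⟨⟨h1, h4⟩, h3⟩
    · rintro ⟨⟨h1, h2⟩, h3⟩
      exact ⟨⟨⟨h1, Nat.le_of_dvd (by omega) h3⟩, h3⟩, h2⟩
  have hlarge : (S.filter (fun d => ¬ d ≤ Nat.sqrt m)).card
      = (T.filter (fun e => e * e < m)).card := by
    apply Finset.card_bij' (i := fun d _ => m / d) (j := fun e _ => m / e)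
    case hi =>
      intro d hd
      simp only [hS, Finset.mem_filter, Finset.mem_Icc] at hd
      obtain ⟨⟨⟨hd1, hdm⟩, hdvd⟩, hdgt⟩ := hd
      obtain ⟨e, he⟩ := hdvd
      have hd0 : 0 < d := by omega
      have hdiv : m / d = e := by rw [he]; exact Nat.mul_div_cancel_left e hd0
      have hmlt : m < d * d := Nat.sqrt_lt.mp (by omega)
      have hed : e < d := by nlinarith
      have he1 : 1 ≤ e := by
        rcases Nat.eq_zero_or_pos e with h | h
        · subst h; omega
        · exact h
      have heem : e * e < m := by nlinarith
      simp only [hT, Finset.mem_filter, Finset.mem_Icc]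
      rw [hdiv]
      exact ⟨⟨⟨he1, Nat.le_sqrt.mpr (by omega)⟩, ⟨d, by rw [he]; ring⟩⟩, heem⟩
    case hj =>
      intro e he
      simp only [hT, Finset.mem_filter, Finset.mem_Icc] at he
      obtain ⟨⟨⟨he1, _⟩, hedvd⟩, heem⟩ := he
      obtain ⟨d, hd⟩ := hedvd
      have he0 : 0 < e := by omega
      have hdiv : m / e = d := by rw [hd]; exact Nat.mul_div_cancel_left d he0
      have hed : e < d := by nlinarith
      have hd1 : 1 ≤ d := by omega
      have hmlt : m < d * d := by nlinarith
      simp only [hS, Finset.mem_filter, Finset.mem_Icc]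
      rw [hdiv]
      refine ⟨⟨⟨hd1, ?_⟩, ⟨e, by rw [hd]; ring⟩⟩, ?_⟩
      · exact Nat.le_of_dvd (by omega) ⟨e, by rw [hd]; ring⟩
      · intro hle
        exact absurd (Nat.le_sqrt.mp hle) (by omega)
    case left_inv =>
      intro d hd
      simp only [hS, Finset.mem_filter, Finset.mem_Icc] at hd
      exact Nat.div_div_self hd.1.2 (by omega)
    case right_inv =>
      intro e he
      simp only [hT, Finset.mem_filter, Finset.mem_Icc] at he
      exact Nat.div_div_self he.1.2 (by omega)
  rw [hRHS, hLHS, hsmall, hlarge]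

theorem num_factors_eq (n : Int) : num_factorsA n = num_factorsB n := by
  by_cases hn : n ≤ 0
  · rw [num_factorsA_nonpos n hn, num_factorsB, divCountLoop, if_neg (by omega)]
  · have hn : 0 < n := by omega
    have hm : n = ((n.toNat : Int)) := by omega
    rw [hm, numA_eq_card, card_reindex, pairing n.toNat (by omega)]
    rw [num_factorsB, divCountLoop_inv n.toNat 1 0 (by omega)]
    have h1 : ((1 : Int)).toNat = 1 := rfl
    rw [h1, Finset.Ico_add_one_right_eq_Icc]
    omega

-- ===== VERDICT (by name: the statement is the Claim_ definition above) =====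
theorem sus_points_spec : Claim_equal_sus_points := by
  intro score _
  unfold Spec_sus_points sus_points sus_points_alt
  simp only [num_factors_eq score]
  by_cases h : num_factorsB score == 3 || num_factorsB score == 4
  · simp only [h, if_true]
    have hpos : 1 ≤ score := by
      by_contra hc
      have h0 : num_factorsA score = 0 := num_factorsA_nonpos score (by omega)
      rw [num_factors_eq] at h0
      rw [h0] at h; simp at h
    exact susLoop_eq _ (score + 1) (by omega)
  · simp [h]
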